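-- pv_equiv track=rewrite | github.com/anhkhoa1306/bigogreen | bt41.py | isMinInArray
-- ===== SOURCE A (Python) =====
-- def isMinInArray(j, i, a):
--     min = a[i][j]
--     l = len(a) - 1
--     while(l >= 0):
--         if(a[l][j] < min):
--             return False
--         l -= 1
--     return True
-- ===== SOURCE B (Python) =====
-- def isMinInArray(j, i, a):
--     col = sorted(row[j] for row in a)
--     return a[i][j] <= col[0]
-- ===== Notes on version B (the rewrite author's own statement) =====
-- stated objective: alternative
-- what changed: B sorts the column and compares a[i][j] with the sorted column's first element, replacing A's backward early-exit element-wise scan with a sort-then-pick strategy.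
-- outside the precondition, e.g. on isMinInArray(0, 0, [[5], [], [1]]): A returns False, B raises IndexError
import Mathlib
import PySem

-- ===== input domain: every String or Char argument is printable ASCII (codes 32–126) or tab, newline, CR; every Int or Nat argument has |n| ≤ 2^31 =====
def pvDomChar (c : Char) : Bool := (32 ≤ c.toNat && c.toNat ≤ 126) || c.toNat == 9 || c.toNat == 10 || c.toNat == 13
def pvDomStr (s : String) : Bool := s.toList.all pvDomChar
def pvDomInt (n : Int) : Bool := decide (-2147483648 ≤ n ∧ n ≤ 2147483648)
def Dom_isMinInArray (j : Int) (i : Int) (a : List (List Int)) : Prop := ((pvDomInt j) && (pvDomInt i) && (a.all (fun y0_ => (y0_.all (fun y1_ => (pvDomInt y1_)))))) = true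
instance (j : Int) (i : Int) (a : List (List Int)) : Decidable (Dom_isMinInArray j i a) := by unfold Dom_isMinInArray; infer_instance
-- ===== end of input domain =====

-- B sorts the column and compares a[i][j] with the sorted column's first element,
-- replacing A's backward early-exit scan (objective: alternative; return value only, no mutation).

-- ===== PORT A =====
-- the while-loop of A: l runs k-1, k-2, …, 0; 'if a[l][j] < min: return False'
def pvLoopA (j m : Int) (a : List (List Int)) : Nat → Bool
  | 0 => true
  | Nat.succ k =>
    match PySem.List.pyGet? a (k : Int) with
    | none => false            -- IndexError in Python (outside Pre_)
    | some row =>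
      match PySem.List.pyGet? row j with
      | none => false          -- IndexError in Python (outside Pre_)
      | some v => if v < m then false else pvLoopA j m a k

def isMinInArray (j : Int) (i : Int) (a : List (List Int)) : Bool :=
  match PySem.List.pyGet? a i with
  | none => false              -- IndexError in Python (outside Pre_)
  | some row0 =>
    match PySem.List.pyGet? row0 j with
    | none => false            -- IndexError in Python (outside Pre_)
    | some m => pvLoopA j m a a.length   -- l = len(a) - 1 downto 0

-- ===== PORT B =====
-- the generator (row[j] for row in a); none = IndexError (outside Pre_)
def pvColOf (j : Int) : List (List Int) → Option (List Int)
  | [] => some []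
  | r :: rs =>
    match PySem.List.pyGet? r j, pvColOf j rs with
    | some v, some vs => some (v :: vs)
    | _, _ => none

def isMinInArray_alt (j : Int) (i : Int) (a : List (List Int)) : Bool :=
  match pvColOf j a with
  | none => false              -- IndexError in the generator (outside Pre_)
  | some rawCol =>
    match PySem.List.pyGet? a i with
    | none => false            -- IndexError (outside Pre_)
    | some row =>
      match PySem.List.pyGet? row j with
      | none => false          -- IndexError (outside Pre_)
      | some x =>
        match PySem.List.sorted rawCol (fun y => y) false with
        | [] => false          -- col[0] IndexError on empty a (outside Pre_)
        | m :: _ => decide (x ≤ m)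

-- ===== PRECONDITION & SPEC =====
-- Pre_ excludes inputs where A raises IndexError (i out of range, or column j missing in the
-- row A reads first), and ragged arrays where some row lacks column j: there B raises
-- IndexError while A may return False early before reaching the short row.
def Pre_isMinInArray (j : Int) (i : Int) (a : List (List Int)) : Prop :=
  (-(a.length : Int) ≤ i ∧ i < a.length) ∧
  ∀ r ∈ a, (-(r.length : Int) ≤ j ∧ j < r.length)
instance (j : Int) (i : Int) (a : List (List Int)) : Decidable (Pre_isMinInArray j i a) := by
  unfold Pre_isMinInArray; infer_instance

def pvWitness_isMinInArray : Int × Int × List (List Int) := (0, 1, [[3, 4], [1, 2], [5, 0]])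

def Spec_isMinInArray (j : Int) (i : Int) (a : List (List Int)) (out : Bool) : Prop := out = isMinInArray_alt j i a
instance (j : Int) (i : Int) (a : List (List Int)) (out : Bool) : Decidable (Spec_isMinInArray j i a out) := by unfold Spec_isMinInArray; infer_instance

-- ===== CLAIM (what is proved, stated in full; the proofs are below) =====
def Claim_equal_isMinInArray : Prop := ∀ (j : Int) (i : Int) (a : List (List Int)), Dom_isMinInArray j i a → Pre_isMinInArray j i a → Spec_isMinInArray j i a (isMinInArray j i a)

-- ===== LEMMAS AND PROOFS =====

lemma pvColOf_of_valid (j : Int) (a : List (List Int))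
    (h : ∀ r ∈ a, (-(r.length : Int) ≤ j ∧ j < r.length)) :
    ∃ col, pvColOf j a = some col := by
  induction a with
  | nil => exact ⟨[], rfl⟩
  | cons r rs ih =>
    obtain ⟨col, hcol⟩ := ih (fun x hx => h x (List.mem_cons_of_mem _ hx))
    have hr := h r (List.mem_cons_self)
    have : PySem.List.pyGet? r j ≠ none := by
      intro hc
      rw [PySem.List.pyGet?_eq_none_iff] at hc
      exact hc ⟨hr.1, hr.2⟩
    obtain ⟨v, hv⟩ := Option.ne_none_iff_exists'.mp this
    exact ⟨v :: col, by simp [pvColOf, hv, hcol]⟩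

lemma pvColOf_mem_forward {j : Int} {a : List (List Int)} {col : List Int}
    (h : pvColOf j a = some col) :
    ∀ x ∈ col, ∃ r ∈ a, PySem.List.pyGet? r j = some x := by
  induction a generalizing col with
  | nil =>
    simp [pvColOf] at h; subst h; intro x hx; simp at hx
  | cons r rs ih =>
    simp only [pvColOf] at h
    cases hg : PySem.List.pyGet? r j with
    | none => rw [hg] at h; simp at h
    | some v =>
      rw [hg] at h
      cases hc : pvColOf j rs with
      | none => rw [hc] at h; simp at h
      | some vs =>
        rw [hc] at h; simp at h; subst h
        intro x hx
        rcases List.mem_cons.mp hx with hx | hx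
        · exact ⟨r, List.mem_cons_self, by rw [hg, hx]⟩
        · obtain ⟨r', hr', hv'⟩ := ih hc x hx
          exact ⟨r', List.mem_cons_of_mem _ hr', hv'⟩

lemma pvColOf_mem_backward {j : Int} {a : List (List Int)} {col : List Int}
    (h : pvColOf j a = some col) :
    ∀ r ∈ a, ∀ x, PySem.List.pyGet? r j = some x → x ∈ col := by
  induction a generalizing col with
  | nil => intro r hr; simp at hr
  | cons r rs ih =>
    simp only [pvColOf] at h
    cases hg : PySem.List.pyGet? r j with
    | none => rw [hg] at h; simp at h
    | some v =>
      rw [hg] at h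
      cases hc : pvColOf j rs with
      | none => rw [hc] at h; simp at h
      | some vs =>
        rw [hc] at h; simp at h; subst h
        intro r' hr' x hx
        rcases List.mem_cons.mp hr' with hr' | hr'
        · subst hr'; rw [hg] at hx; simp at hx; simp [hx]
        · exact List.mem_cons_of_mem _ (ih hc r' hr' x hx)

lemma pvColOf_ne_nil {j : Int} {a : List (List Int)} {col : List Int}
    (h : pvColOf j a = some col) (ha : a ≠ []) : col ≠ [] := by
  cases a with
  | nil => exact absurd rfl ha
  | cons r rs =>
    simp only [pvColOf] at h
    cases hg : PySem.List.pyGet? r j with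
    | none => rw [hg] at h; simp at h
    | some v =>
      rw [hg] at h
      cases hc : pvColOf j rs with
      | none => rw [hc] at h; simp at h
      | some vs => rw [hc] at h; simp at h; subst h; simp

-- A's loop over indices k-1 … 0 returns true iff no read element is below m
lemma pvLoopA_true_iff (j m : Int) (a : List (List Int)) (k : Nat) (hk : k ≤ a.length)
    (hv : ∀ r ∈ a, (-(r.length : Int) ≤ j ∧ j < r.length)) :
    pvLoopA j m a k = true ↔ ∀ l, (h : l < k) → ∀ x, PySem.List.pyGet? a[l]! j = some x → m ≤ x := by
  induction k with
  | zero => simp [pvLoopA]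
  | succ k ih =>
    have hk' : k < a.length := hk
    have hgk : PySem.List.pyGet? a (k : Int) = some a[k] := by
      rw [PySem.List.pyGet?_natCast]; simp [hk']
    have hrm : a[k] ∈ a := List.getElem_mem hk'
    have hvj := hv _ hrm
    have hne : PySem.List.pyGet? a[k] j ≠ none := by
      intro hc; rw [PySem.List.pyGet?_eq_none_iff] at hc; exact hc ⟨hvj.1, hvj.2⟩
    obtain ⟨v, hvv⟩ := Option.ne_none_iff_exists'.mp hne
    simp only [pvLoopA, hgk, hvv]
    constructor
    · intro h l hl x hx
      split at h
      · exact absurd h (by simp)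
      · rename_i hvm
        rcases Nat.lt_succ_iff_lt_or_eq.mp hl with hl | hl
        · exact (ih (Nat.le_of_succ_le hk)).mp h l hl x hx
        · subst hl
          have : a[l]! = a[l] := getElem!_pos a l hk'
          rw [this, hvv] at hx
          simp at hx; subst hx; omega
    · intro h
      have hvm : ¬ v < m := by
        have : a[k]! = a[k] := getElem!_pos a k hk'
        have := h k (Nat.lt_succ_self k) v (by rw [this, hvv])
        omega
      simp only [if_neg hvm]
      exact (ih (Nat.le_of_succ_le hk)).mpr (fun l hl x hx => h l (Nat.lt_succ_of_lt hl) x hx)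

-- membership in col ↔ some index's column entry
lemma pv_col_char {j : Int} {a : List (List Int)} {col : List Int}
    (hcol : pvColOf j a = some col) (m : Int) :
    (∀ x ∈ col, m ≤ x) ↔ (∀ l, (h : l < a.length) → ∀ x, PySem.List.pyGet? a[l]! j = some x → m ≤ x) := by
  constructor
  · intro h l hl x hx
    have : a[l]! = a[l] := getElem!_pos a l hl
    rw [this] at hx
    exact h x (pvColOf_mem_backward hcol a[l] (List.getElem_mem hl) x hx)
  · intro h x hx
    obtain ⟨r, hr, hrx⟩ := pvColOf_mem_forward hcol x hx
    obtain ⟨l, hl, hrl⟩ := List.mem_iff_getElem.mp hr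
    have : a[l]! = a[l] := getElem!_pos a l hl
    exact h l hl x (by rw [this, hrl]; exact hrx)

-- ===== VERDICT (by name: the statement is the Claim_ definition above) =====
theorem isMinInArray_spec : Claim_equal_isMinInArray := by
  intro j i a _hdom hpre
  obtain ⟨⟨hi1, hi2⟩, hrows⟩ := hpre
  have hane : a ≠ [] := by
    intro h; subst h; simp at hi1 hi2; omega
  have hrow : PySem.List.pyGet? a i ≠ none := by
    intro hc; rw [PySem.List.pyGet?_eq_none_iff] at hc; exact hc ⟨hi1, hi2⟩
  obtain ⟨row0, hrow0⟩ := Option.ne_none_iff_exists'.mp hrow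
  have hrow0mem : row0 ∈ a := PySem.List.mem_of_pyGet?_eq_some _ hrow0
  have hvj := hrows _ hrow0mem
  have hmne : PySem.List.pyGet? row0 j ≠ none := by
    intro hc; rw [PySem.List.pyGet?_eq_none_iff] at hc; exact hc ⟨hvj.1, hvj.2⟩
  obtain ⟨m, hm⟩ := Option.ne_none_iff_exists'.mp hmne
  obtain ⟨col, hcol⟩ := pvColOf_of_valid j a hrows
  have hcne : col ≠ [] := pvColOf_ne_nil hcol hane
  have hsne : PySem.List.sorted col (fun y => y) false ≠ [] := by
    intro hc; exact hcne ((PySem.List.sorted_eq_nil_iff col (fun y => y) false).mp hc)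
  obtain ⟨mc, t, hmc⟩ := List.exists_cons_of_ne_nil hsne
  have hmcmem : mc ∈ col := by
    have := PySem.List.mem_sorted col (fun y => y) false mc
    rw [hmc] at this
    exact this.mp (List.mem_cons_self)
  have hmcmin : ∀ y ∈ col, mc ≤ y := PySem.List.key_head_sorted_le col (fun y => y) hmc
  have hmcol : m ∈ col := pvColOf_mem_backward hcol row0 hrow0mem m hm
  unfold Spec_isMinInArray isMinInArray isMinInArray_alt
  simp only [hrow0, hm, hcol, hmc]
  rw [show (pvLoopA j m a a.length = decide (m ≤ mc)) ↔ _ from Bool.eq_iff_iff]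
  rw [pvLoopA_true_iff j m a a.length le_rfl hrows]
  rw [← pv_col_char hcol m]
  simp only [decide_eq_true_eq]
  constructor
  · intro h; exact h mc hmcmem
  · intro h x hx; exact le_trans h (hmcmin x hx)
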